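-- pv_equiv track=rewrite | github.com/Adam04052001/chanda | chanda2.py | ierarchy
-- ===== SOURCE A (Python) =====
-- def ierarchy(first_data):
--     departments = {}                                  # создадим словарь для иерархии и будем мутить словарь в словаре
--     for line in first_data[1:]:
--         if line[1] not in departments:
--             departments[line[1]] = [line[2]]
--         if line[2] not in departments[line[1]]:
--             departments[line[1]].append(line[2])
--     return departments
-- ===== SOURCE B (Python) =====
-- def ierarchy(first_data):
--     rows = first_data[1:]
--     keys = []
--     for line in rows:
--         if line[1] not in keys:
--             keys.append(line[1])
--     departments = {}
--     for k in keys: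
--         vals = []
--         for line in rows:
--             if line[1] == k and line[2] not in vals:
--                 vals.append(line[2])
--         departments[k] = vals
--     return departments
-- ===== Notes on version B (the rewrite author's own statement) =====
-- stated objective: alternative
-- what changed: Replaces A's single pass that builds the value lists incrementally per row with a two-phase per-key algorithm: one pass collects the distinct keys in first-seen order, then for each key a separate full scan of the rows gathers its distinct values; correct because first-seen order per key is preserved by scanning rows in order.
import Mathlib
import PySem

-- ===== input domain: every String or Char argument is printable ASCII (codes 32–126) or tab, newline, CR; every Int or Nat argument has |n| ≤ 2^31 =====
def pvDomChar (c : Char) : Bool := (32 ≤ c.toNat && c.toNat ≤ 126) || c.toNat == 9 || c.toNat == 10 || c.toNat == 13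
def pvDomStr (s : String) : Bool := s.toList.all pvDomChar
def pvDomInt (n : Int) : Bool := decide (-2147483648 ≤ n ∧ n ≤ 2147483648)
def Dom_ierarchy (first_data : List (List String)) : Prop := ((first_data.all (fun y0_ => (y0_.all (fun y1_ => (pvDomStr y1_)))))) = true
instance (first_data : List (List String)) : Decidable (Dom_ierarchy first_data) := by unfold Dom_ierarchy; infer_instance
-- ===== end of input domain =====

-- B replaces A's single incremental pass by a two-phase per-key algorithm:
-- collect the distinct keys first, then one separate scan of the rows per key.

-- ===== PORT A =====
-- A's loop body: 'if line[1] not in departments: departments[line[1]] = [line[2]]'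
-- then 'if line[2] not in departments[line[1]]: departments[line[1]].append(line[2])'.
-- Under Pre_ (rows after the first have length ≥ 3) line[1]/line[2] are in range,
-- so List.getD at the literal non-negative indices 1, 2 is exact.
def ierarchyStepA (d : PySem.Dict String (List String)) (line : List String) :
    PySem.Dict String (List String) :=
  let k := line.getD 1 ""
  let v := line.getD 2 ""
  let d1 := if d.contains k = false then d.insert k [v] else d
  if (d1.getD k []).contains v = false then d1.insert k (d1.getD k [] ++ [v]) else d1

def ierarchy (first_data : List (List String)) : List (String × List String) :=
  ((first_data.drop 1).foldl ierarchyStepA PySem.Dict.empty).items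

-- ===== PORT B =====
-- first pass: 'if line[1] not in keys: keys.append(line[1])'
def ierarchyKeys (rows : List (List String)) : List String :=
  rows.foldl (fun ks line =>
    if ks.contains (line.getD 1 "") = false then ks ++ [line.getD 1 ""] else ks) []

-- inner scan for one key: 'if line[1] == k and line[2] not in vals: vals.append(line[2])'
def ierarchyVals (rows : List (List String)) (k : String) : List String :=
  rows.foldl (fun vs line =>
    if line.getD 1 "" == k && !(vs.contains (line.getD 2 ""))
    then vs ++ [line.getD 2 ""] else vs) []

def ierarchy_alt (first_data : List (List String)) : List (String × List String) :=
  let rows := first_data.drop 1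
  (((ierarchyKeys rows).foldl
      (fun d k => d.insert k (ierarchyVals rows k)) PySem.Dict.empty)).items

-- ===== PRECONDITION & SPEC =====
-- Pre_ excludes exactly the inputs on which A raises IndexError: a row after the
-- first with fewer than 3 fields.
def Pre_ierarchy (first_data : List (List String)) : Prop :=
  ∀ line ∈ first_data.drop 1, 3 ≤ line.length
instance (first_data : List (List String)) : Decidable (Pre_ierarchy first_data) := by
  unfold Pre_ierarchy; infer_instance

def pvWitness_ierarchy : List (List String) :=
  [["hdr", "h1", "h2"], ["1", "dep", "team"], ["2", "dep", "team2"]]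

def Spec_ierarchy (first_data : List (List String)) (out : List (String × List String)) : Prop := out = ierarchy_alt first_data
instance (first_data : List (List String)) (out : List (String × List String)) : Decidable (Spec_ierarchy first_data out) := by unfold Spec_ierarchy; infer_instance

-- ===== CLAIM (what is proved, stated in full; the proofs are below) =====
def Claim_equal_ierarchy : Prop := ∀ (first_data : List (List String)), Dom_ierarchy first_data → Pre_ierarchy first_data → Spec_ierarchy first_data (ierarchy first_data)

-- ===== LEMMAS AND PROOFS =====

-- A's dict, characterised: keys in first-seen order, each mapped to B's per-key scan
def modelD (rows : List (List String)) : PySem.Dict String (List String) :=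
  PySem.Dict.mk ((ierarchyKeys rows).map (fun k => (k, ierarchyVals rows k)))

theorem items_modelD (rows : List (List String)) :
    (modelD rows).items = (ierarchyKeys rows).map (fun k => (k, ierarchyVals rows k)) := rfl

theorem keys_modelD (rows : List (List String)) :
    (modelD rows).keys = ierarchyKeys rows := by
  show ((ierarchyKeys rows).map (fun k => (k, ierarchyVals rows k))).map (fun p => p.1)
        = ierarchyKeys rows
  rw [List.map_map]
  exact (List.map_congr_left fun k _ => rfl).trans (List.map_id _)

theorem nodup_aux (rows : List (List String)) :
    ∀ acc : List String, acc.Nodup →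
      (rows.foldl (fun ks line =>
        if ks.contains (line.getD 1 "") = false then ks ++ [line.getD 1 ""] else ks) acc).Nodup := by
  induction rows with
  | nil => intro acc h; exact h
  | cons l rest ih =>
    intro acc h
    simp only [List.foldl_cons]
    by_cases hc : acc.contains (l.getD 1 "") = false
    · refine ih _ ?_
      rw [if_pos hc]
      have hm : l.getD 1 "" ∉ acc := by simpa [List.contains_eq_mem] using hc
      exact List.Nodup.append h (List.nodup_singleton _)
        (by simpa [List.disjoint_singleton] using hm)
    · simp only [hc]; exact ih _ h

theorem nodup_ierarchyKeys (rows : List (List String)) : (ierarchyKeys rows).Nodup :=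
  nodup_aux rows [] List.nodup_nil

theorem mem_keys_aux (rows : List (List String)) (k : String) :
    ∀ acc : List String,
      (k ∈ (rows.foldl (fun ks line =>
        if ks.contains (line.getD 1 "") = false then ks ++ [line.getD 1 ""] else ks) acc))
      ↔ (k ∈ acc ∨ ∃ l ∈ rows, l.getD 1 "" = k) := by
  induction rows with
  | nil => intro acc; simp
  | cons l rest ih =>
    intro acc
    simp only [List.foldl_cons]
    rw [ih]
    by_cases hc : acc.contains (l.getD 1 "") = false
    · simp only [hc, if_true]
      constructor
      · rintro (h | h)
        · rcases List.mem_append.mp h with h | h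
          · exact Or.inl h
          · exact Or.inr ⟨l, by simp, (List.mem_singleton.mp h).symm⟩
        · exact Or.inr (by rcases h with ⟨w, hw, hwk⟩; exact ⟨w, by simp [hw], hwk⟩)
      · rintro (h | ⟨w, hw, hwk⟩)
        · exact Or.inl (List.mem_append.mpr (Or.inl h))
        · rcases List.mem_cons.mp hw with rfl | hw
          · refine Or.inl (List.mem_append.mpr (Or.inr ?_))
            simpa using hwk.symm
          · exact Or.inr ⟨w, hw, hwk⟩
    · simp only [hc]
      constructor
      · rintro (h | ⟨w, hw, hwk⟩)
        · exact Or.inl h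
        · exact Or.inr ⟨w, by simp [hw], hwk⟩
      · rintro (h | ⟨w, hw, hwk⟩)
        · exact Or.inl h
        · rcases List.mem_cons.mp hw with rfl | hw
          · subst hwk
            simp only [Bool.not_eq_false] at hc
            exact Or.inl (by simpa [List.contains_eq_mem] using hc)
          · exact Or.inr ⟨w, hw, hwk⟩

theorem mem_ierarchyKeys (rows : List (List String)) (k : String) :
    k ∈ ierarchyKeys rows ↔ ∃ l ∈ rows, l.getD 1 "" = k := by
  rw [ierarchyKeys, mem_keys_aux]; simp

theorem vals_nil_aux (rows : List (List String)) (k : String)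
    (h : ∀ l ∈ rows, l.getD 1 "" ≠ k) :
    ∀ acc : List String,
      rows.foldl (fun vs line =>
        if line.getD 1 "" == k && !(vs.contains (line.getD 2 ""))
        then vs ++ [line.getD 2 ""] else vs) acc = acc := by
  induction rows with
  | nil => intro acc; rfl
  | cons l rest ih =>
    intro acc
    have hne : l.getD 1 "" ≠ k := h l (List.mem_cons_self)
    have hl : (l.getD 1 "" == k) = false := by simpa using hne
    simp only [List.foldl_cons, hl, Bool.false_and, Bool.false_eq_true, if_false]
    exact ih (fun w hw => h w (List.mem_cons_of_mem _ hw)) acc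

theorem vals_nil_of_not_mem (rows : List (List String)) (k : String)
    (h : k ∉ ierarchyKeys rows) : ierarchyVals rows k = [] := by
  apply vals_nil_aux
  intro l hl hlk
  exact h ((mem_ierarchyKeys rows k).mpr ⟨l, hl, hlk⟩)

theorem contains_modelD (rows : List (List String)) (k : String) :
    (modelD rows).contains k = (ierarchyKeys rows).contains k := by
  rw [PySem.Dict.contains_eq_decide_mem_keys, keys_modelD, List.contains_eq_mem]

theorem getD_modelD (rows : List (List String)) (k : String) (hk : k ∈ ierarchyKeys rows) :
    (modelD rows).getD k [] = ierarchyVals rows k := by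
  apply PySem.Dict.getD_of_mem_items
  · exact List.mem_map.mpr ⟨k, hk, rfl⟩
  · rw [keys_modelD]; exact nodup_ierarchyKeys rows

theorem keys_snoc (p : List (List String)) (l : List String) (k1 : String)
    (h1 : l.getD 1 "" = k1) :
    ierarchyKeys (p ++ [l]) =
      if (ierarchyKeys p).contains k1 = false
      then ierarchyKeys p ++ [k1] else ierarchyKeys p := by
  subst h1; simp [ierarchyKeys, List.foldl_append]

theorem vals_snoc (p : List (List String)) (l : List String) (k1 v2 : String)
    (h1 : l.getD 1 "" = k1) (h2 : l.getD 2 "" = v2) (k : String) :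
    ierarchyVals (p ++ [l]) k =
      if k1 == k && !((ierarchyVals p k).contains v2)
      then ierarchyVals p k ++ [v2] else ierarchyVals p k := by
  subst h1 h2; simp [ierarchyVals, List.foldl_append]

theorem stepA_model (p : List (List String)) (l : List String) :
    ierarchyStepA (modelD p) l = modelD (p ++ [l]) := by
  obtain ⟨k1, hk1⟩ : ∃ k1, l.getD 1 "" = k1 := ⟨_, rfl⟩
  obtain ⟨v2, hv2⟩ : ∃ v2, l.getD 2 "" = v2 := ⟨_, rfl⟩
  unfold ierarchyStepA
  dsimp only
  rw [hk1, hv2]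
  by_cases hmem : k1 ∈ ierarchyKeys p
  · -- key already present
    have c1 : ¬((modelD p).contains k1 = false) := by
      rw [contains_modelD]; simp [List.contains_eq_mem, hmem]
    rw [if_neg c1, getD_modelD p k1 hmem]
    have hkeq : ierarchyKeys (p ++ [l]) = ierarchyKeys p := by
      rw [keys_snoc p l k1 hk1, if_neg (by simp [List.contains_eq_mem, hmem])]
    by_cases hv : v2 ∈ ierarchyVals p k1
    · -- duplicate value: unchanged
      rw [if_neg (by simp [List.contains_eq_mem, hv])]
      apply PySem.Dict.ext
      rw [items_modelD, items_modelD, hkeq]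
      apply List.map_congr_left
      intro k _
      rw [vals_snoc p l k1 v2 hk1 hv2 k]
      by_cases hkk : k1 = k
      · subst hkk; simp [List.contains_eq_mem, hv]
      · simp [hkk]
    · -- new value: appended to k1's list
      rw [if_pos (by simp [List.contains_eq_mem, hv])]
      apply PySem.Dict.ext
      rw [PySem.Dict.items_insert_of_contains _ _
        (by rw [contains_modelD]; simp [List.contains_eq_mem, hmem])]
      rw [items_modelD, items_modelD, hkeq, List.map_map]
      apply List.map_congr_left
      intro k _
      rw [vals_snoc p l k1 v2 hk1 hv2 k]
      by_cases hkk : k1 = k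
      · subst hkk
        simp [Function.comp, List.contains_eq_mem, hv]
      · have hkk' : k ≠ k1 := Ne.symm hkk
        simp [Function.comp, hkk, hkk']
  · -- fresh key
    have c1 : (modelD p).contains k1 = false := by
      rw [contains_modelD]; simp [List.contains_eq_mem, hmem]
    rw [if_pos c1, PySem.Dict.getD_insert_self, if_neg (by simp)]
    have hkeq : ierarchyKeys (p ++ [l]) = ierarchyKeys p ++ [k1] := by
      rw [keys_snoc p l k1 hk1, if_pos (by simp [List.contains_eq_mem, hmem])]
    apply PySem.Dict.ext
    rw [PySem.Dict.items_insert_of_not_contains _ _ c1]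
    rw [items_modelD, items_modelD, hkeq, List.map_append]
    congr 1
    · apply List.map_congr_left
      intro k hkm
      rw [vals_snoc p l k1 v2 hk1 hv2 k]
      have hkk : k1 ≠ k := fun h => hmem (h ▸ hkm)
      simp [hkk]
    · rw [List.map_singleton, vals_snoc p l k1 v2 hk1 hv2 k1,
        vals_nil_of_not_mem p k1 hmem]
      simp

theorem foldA_eq_model (rows : List (List String)) :
    rows.foldl ierarchyStepA PySem.Dict.empty = modelD rows := by
  induction rows using List.reverseRecOn with
  | nil => rfl
  | append_singleton p l ih =>
    rw [List.foldl_append, List.foldl_cons, List.foldl_nil, ih, stepA_model]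

theorem alt_items (rows : List (List String)) :
    ((ierarchyKeys rows).foldl
      (fun d k => d.insert k (ierarchyVals rows k)) PySem.Dict.empty).items
      = (ierarchyKeys rows).map (fun k => (k, ierarchyVals rows k)) := by
  have h := PySem.Dict.items_foldl_insert_fresh (l := ierarchyKeys rows)
    (k := fun a => a) (v := fun a => ierarchyVals rows a)
    (d := PySem.Dict.empty)
    (by intro a _; exact PySem.Dict.contains_empty a)
    (by simpa using nodup_ierarchyKeys rows)
  simpa using h

-- ===== VERDICT (by name: the statement is the Claim_ definition above) =====
theorem ierarchy_spec : Claim_equal_ierarchy := by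
  intro first_data _ _
  unfold Spec_ierarchy ierarchy ierarchy_alt
  rw [foldA_eq_model, alt_items]
  rfl
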